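-- pv_equiv track=rewrite | github.com/Parkyes90/algo | count_ones.py | count_ones_by_multiplier
-- ===== SOURCE A (Python) =====
-- def count_ones_by_multiplier(multi):
--     dp = [0] * multi
--     dp[0] = 1
--     idx = 1
--     while idx < multi:
--         dp[idx] = dp[idx - 1] * 10 + 10 ** idx
--         idx += 1
--     return dp
-- ===== SOURCE B (Python) =====
-- def count_ones_by_multiplier(multi):
--     # closed form: dp[i] = (i+1) * 10**i, each element computed independently
--     return [(i + 1) * 10 ** i for i in range(multi)]
-- ===== Notes on version B (the rewrite author's own statement) =====
-- stated objective: simpler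
-- what changed: Replaced the sequential recurrence dp[idx]=dp[idx-1]*10+10**idx over a preallocated mutated list with a direct per-element closed form (i+1)*10**i, with no carried dp state.
import Mathlib
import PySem

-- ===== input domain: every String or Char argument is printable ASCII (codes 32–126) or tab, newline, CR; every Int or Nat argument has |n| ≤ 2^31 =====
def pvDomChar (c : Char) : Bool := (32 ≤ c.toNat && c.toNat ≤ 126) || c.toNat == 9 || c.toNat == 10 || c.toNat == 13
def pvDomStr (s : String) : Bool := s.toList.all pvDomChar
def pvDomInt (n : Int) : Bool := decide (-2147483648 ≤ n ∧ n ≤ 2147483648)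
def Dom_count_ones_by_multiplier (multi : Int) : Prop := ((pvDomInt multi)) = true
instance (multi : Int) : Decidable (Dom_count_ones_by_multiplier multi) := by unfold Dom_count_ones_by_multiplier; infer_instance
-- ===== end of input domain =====

-- B changes the sequential recurrence dp[idx] = dp[idx-1]*10 + 10**idx into the
-- per-element closed form (i+1)*10**i (objective: simpler).

-- ===== PORT A =====
-- dp = [0]*multi; dp[0] = 1; while idx < multi: dp[idx] = dp[idx-1]*10 + 10**idx
-- dp[0] = 1 is in range exactly under Pre_ (1 ≤ multi); List.set is a no-op out of range.
def count_ones_by_multiplier (multi : Int) : List Int :=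
  let dp := (List.replicate multi.toNat (0 : Int)).set 0 1
  (PySem.List.pyRange 1 multi 1).foldl
    (fun dp idx =>
      dp.set idx.toNat (PySem.List.pyGetD dp (idx - 1) 0 * 10 + 10 ^ idx.toNat)) dp

-- ===== PORT B =====
def count_ones_by_multiplier_alt (multi : Int) : List Int :=
  (PySem.List.pyRange 0 multi 1).map (fun i => (i + 1) * 10 ^ i.toNat)

-- ===== PRECONDITION & SPEC =====
-- Pre_: multi ≥ 1; on multi ≤ 0 the Python A raises IndexError at dp[0] = 1.
def Pre_count_ones_by_multiplier (multi : Int) : Prop := 1 ≤ multi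
instance (multi : Int) : Decidable (Pre_count_ones_by_multiplier multi) := by
  unfold Pre_count_ones_by_multiplier; infer_instance
def pvWitness_count_ones_by_multiplier : Int := 3

def Spec_count_ones_by_multiplier (multi : Int) (out : List Int) : Prop :=
  out = count_ones_by_multiplier_alt multi
instance (multi : Int) (out : List Int) : Decidable (Spec_count_ones_by_multiplier multi out) := by
  unfold Spec_count_ones_by_multiplier; infer_instance

-- ===== CLAIM (what is proved, stated in full; the proofs are below) =====
def Claim_equal_count_ones_by_multiplier : Prop := ∀ (multi : Int), Dom_count_ones_by_multiplier multi → Pre_count_ones_by_multiplier multi → Spec_count_ones_by_multiplier multi (count_ones_by_multiplier multi)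

-- ===== LEMMAS AND PROOFS =====

-- the dp list after the iterations for indices 1..m-1 have run: first m entries
-- carry the closed form, the rest are still 0
def pvTarget (n m : Nat) : List Int :=
  (List.range n).map (fun i => if i < m then ((i : Int) + 1) * 10 ^ i else 0)

theorem pvTarget_init (n : Nat) :
    (List.replicate n (0 : Int)).set 0 1 = pvTarget n 1 := by
  apply List.ext_getElem
  · simp [pvTarget]
  · intro i h1 h2
    simp [pvTarget] at h2 ⊢
    rcases Nat.eq_zero_or_pos i with hi | hi
    · subst hi; simp
    · simp [Nat.pos_iff_ne_zero.mp hi, (Nat.pos_iff_ne_zero.mp hi).symm]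

theorem pvTarget_getD (n m : Nat) (h1 : 1 ≤ m) (h2 : m ≤ n) :
    PySem.List.pyGetD (pvTarget n m) ((m : Int) - 1) 0 = (m : Int) * 10 ^ (m - 1) := by
  have hcast : ((m : Int) - 1) = ((m - 1 : Nat) : Int) := by omega
  rw [hcast, PySem.List.pyGetD_natCast]
  have hlt : m - 1 < n := by omega
  simp [pvTarget, List.getD_eq_getElem?_getD, hlt, show m - 1 < m by omega]
  omega

theorem pvTarget_step (n m : Nat) (hm : m < n) :
    (pvTarget n m).set m (((m : Int) + 1) * 10 ^ m) = pvTarget n (m + 1) := by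
  apply List.ext_getElem
  · simp [pvTarget]
  · intro i h1 h2
    simp [pvTarget] at h2 ⊢
    by_cases hi : i = m
    · subst hi
      rw [List.getElem_set]
      simp
    · rw [List.getElem_set]
      simp [Ne.symm hi]
      have : (i < m) ↔ (i < m + 1) := by omega
      simp [this]

theorem pvLoop (n : Nat) : ∀ m, 1 ≤ m → m ≤ n →
    (PySem.List.pyRange 1 (m : Int) 1).foldl
      (fun dp idx =>
        dp.set idx.toNat (PySem.List.pyGetD dp (idx - 1) 0 * 10 + 10 ^ idx.toNat))
      (pvTarget n 1) = pvTarget n m := by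
  intro m
  induction m with
  | zero => omega
  | succ m ih =>
    intro _ hle
    rcases Nat.eq_zero_or_pos m with hm | hm
    · subst hm
      rw [show ((1 : Nat) : Int) = 1 by norm_num, PySem.List.pyRange_one_eq_nil (by omega)]
      rfl
    · have hmn : m < n := by omega
      have hr : PySem.List.pyRange 1 ((m + 1 : Nat) : Int) 1
          = PySem.List.pyRange 1 (m : Int) 1 ++ [(m : Int)] := by
        have : ((m + 1 : Nat) : Int) = (m : Int) + 1 := by push_cast; ring
        rw [this, PySem.List.pyRange_one_succ_right (by exact_mod_cast hm)]
      rw [hr, List.foldl_append, ih hm (by omega)]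
      simp only [List.foldl]
      rw [pvTarget_getD n m hm (by omega), Int.toNat_natCast]
      have hv : (m : Int) * 10 ^ (m - 1) * 10 + 10 ^ m = ((m : Int) + 1) * 10 ^ m := by
        have h10 : (10 : Int) ^ (m - 1) * 10 = 10 ^ m := by
          rw [← pow_succ]; congr 1; omega
        nlinarith [h10]
      rw [hv]
      exact pvTarget_step n m hmn

theorem count_ones_alt_eq (multi : Int) (h : 1 ≤ multi) :
    count_ones_by_multiplier_alt multi = pvTarget multi.toNat multi.toNat := by
  unfold count_ones_by_multiplier_alt pvTarget
  rw [show multi = (multi.toNat : Int) by omega, PySem.List.pyRange_one]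
  rw [Int.toNat_natCast]
  simp only [Int.sub_zero, Int.toNat_natCast, List.map_map]
  apply List.map_congr_left
  intro i hi
  simp at hi
  simp [hi]

theorem count_ones_A_eq (multi : Int) (h : 1 ≤ multi) :
    count_ones_by_multiplier multi = pvTarget multi.toNat multi.toNat := by
  unfold count_ones_by_multiplier
  have hn : 1 ≤ multi.toNat := by omega
  simp only []
  rw [pvTarget_init multi.toNat]
  rw [show PySem.List.pyRange 1 multi 1 = PySem.List.pyRange 1 (multi.toNat : Int) 1 by
    congr 1; omega]
  exact pvLoop multi.toNat multi.toNat hn (le_refl _)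

-- ===== VERDICT (by name: the statement is the Claim_ definition above) =====
theorem count_ones_by_multiplier_spec : Claim_equal_count_ones_by_multiplier := by
  intro multi _ hpre
  unfold Spec_count_ones_by_multiplier
  rw [count_ones_A_eq multi hpre, count_ones_alt_eq multi hpre]
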